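-- pv_equiv track=rewrite | github.com/francescameneghello/RIMS | decision_mining_last_payload.py | extract_event_from_trace
-- ===== SOURCE A (Python) =====
-- def extract_event_from_trace(trace, activity):
--     i = len(trace) - 1
--     while i >= 0:
--         if trace[i]['concept:name'] == activity:
--             return trace[i]
--         else:
--             i -= 1
--     return None
-- ===== SOURCE B (Python) =====
-- def extract_event_from_trace(trace, activity):
--     def last_match(lo, hi):
--         # last matching event in trace[lo:hi]: search the right half first,
--         # look at the left half only if the right half has no match
--         if hi - lo == 0:
--             return None
--         if hi - lo == 1:
--             return trace[lo] if trace[lo]['concept:name'] == activity else None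
--         mid = (lo + hi) // 2
--         right = last_match(mid, hi)
--         if right is not None:
--             return right
--         return last_match(lo, mid)
--     return last_match(0, len(trace))
-- ===== Notes on version B (the rewrite author's own statement) =====
-- stated objective: alternative
-- what changed: Replaced the backward index loop with early return by a divide-and-conquer recursion that searches the right half of the trace before the left, so the last match is found structurally instead of by counting indices down.
import Mathlib
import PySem

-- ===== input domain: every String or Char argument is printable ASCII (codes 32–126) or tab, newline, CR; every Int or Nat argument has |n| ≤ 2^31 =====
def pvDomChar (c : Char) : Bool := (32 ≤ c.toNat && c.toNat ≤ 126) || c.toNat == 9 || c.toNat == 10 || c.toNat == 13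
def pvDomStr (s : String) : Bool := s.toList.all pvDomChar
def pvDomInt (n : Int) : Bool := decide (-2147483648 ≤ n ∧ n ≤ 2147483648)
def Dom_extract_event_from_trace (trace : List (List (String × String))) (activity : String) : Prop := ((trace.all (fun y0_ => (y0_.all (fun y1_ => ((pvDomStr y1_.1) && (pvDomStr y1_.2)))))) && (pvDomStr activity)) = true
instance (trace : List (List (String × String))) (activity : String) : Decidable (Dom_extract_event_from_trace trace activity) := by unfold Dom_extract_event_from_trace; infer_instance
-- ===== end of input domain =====

-- B replaces A's backward index loop (early return on the first match from the
-- back) by a divide-and-conquer recursion that searches the right half before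
-- the left (alternative decomposition; same O(n) cost).

-- ===== PORT A =====
-- A's while-loop: i counts down from len(trace)-1; here the Nat argument is i+1
-- (0 = loop exit). trace[i]['concept:name'] is Dict lookup (first match in the
-- association list); the KeyError case is excluded by Pre_ below (inside Pre_,
-- every event A inspects has the key, so 'get? = some activity' is exact).
def extract_event_from_trace_goA (trace : List (List (String × String))) (activity : String) : Nat → Option (List (String × String))
  | 0 => none
  | i + 1 =>
    match getElem? trace i with
    | some e =>
      if PySem.Dict.get? (PySem.Dict.mk e) "concept:name" = some activity then some e
      else extract_event_from_trace_goA trace activity i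
    | none => none

def extract_event_from_trace (trace : List (List (String × String))) (activity : String) : Option (List (String × String)) :=
  extract_event_from_trace_goA trace activity trace.length

-- ===== PORT B =====
-- Source B's last_match(lo, hi): last matching event of trace[lo:hi], right half
-- first, left half only when the right half has no match. As in PORT A, the
-- KeyError on a keyless inspected event is excluded by Pre_.
def extract_event_from_trace_goB (trace : List (List (String × String))) (activity : String) (lo hi : Nat) : Option (List (String × String)) :=
  if hi - lo = 0 then none
  else if hi - lo = 1 then
    match getElem? trace lo with
    | some e => if PySem.Dict.get? (PySem.Dict.mk e) "concept:name" = some activity then some e else none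
    | none => none
  else
    match extract_event_from_trace_goB trace activity ((lo + hi) / 2) hi with
    | some r => some r
    | none => extract_event_from_trace_goB trace activity lo ((lo + hi) / 2)
termination_by hi - lo
decreasing_by all_goals omega

def extract_event_from_trace_alt (trace : List (List (String × String))) (activity : String) : Option (List (String × String)) :=
  extract_event_from_trace_goB trace activity 0 trace.length

-- ===== PRECONDITION & SPEC =====
-- Pre_ excludes exactly the traces on which both Pythons raise KeyError: those
-- with an event lacking the 'concept:name' key and no matching event at or
-- after its index (each version inspects that keyless event before returning).
def Pre_extract_event_from_trace (trace : List (List (String × String))) (activity : String) : Prop :=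
  ∀ i, i < trace.length →
    (PySem.Dict.get? (PySem.Dict.mk (trace.getD i [])) "concept:name" = none →
      ((trace.drop i).any (fun e => PySem.Dict.get? (PySem.Dict.mk e) "concept:name" == some activity)) = true)
instance (trace : List (List (String × String))) (activity : String) : Decidable (Pre_extract_event_from_trace trace activity) := by unfold Pre_extract_event_from_trace; infer_instance

def pvWitness_extract_event_from_trace : (List (List (String × String))) × String :=
  ([[("concept:name", "a")], [("concept:name", "b")]], "a")

def Spec_extract_event_from_trace (trace : List (List (String × String))) (activity : String) (out : Option (List (String × String))) : Prop := out = extract_event_from_trace_alt trace activity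
instance (trace : List (List (String × String))) (activity : String) (out : Option (List (String × String))) : Decidable (Spec_extract_event_from_trace trace activity out) := by unfold Spec_extract_event_from_trace; infer_instance

-- ===== CLAIM (what is proved, stated in full; the proofs are below) =====
def Claim_equal_extract_event_from_trace : Prop := ∀ (trace : List (List (String × String))) (activity : String), Dom_extract_event_from_trace trace activity → Pre_extract_event_from_trace trace activity → Spec_extract_event_from_trace trace activity (extract_event_from_trace trace activity)

-- ===== LEMMAS AND PROOFS =====

-- the common yardstick: the last matching event of a list, as a left fold
def pvLastMatch (activity : String) (xs : List (List (String × String))) : Option (List (String × String)) :=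
  xs.foldl (fun result e =>
    if PySem.Dict.get? (PySem.Dict.mk e) "concept:name" = some activity then some e else result) none

-- a fold started from any accumulator: the list's own last match wins, else the accumulator
theorem pvLastMatch_init (activity : String) (ys : List (List (String × String))) :
    ∀ a, ys.foldl (fun result e =>
        if PySem.Dict.get? (PySem.Dict.mk e) "concept:name" = some activity then some e else result) a =
      (match pvLastMatch activity ys with | some r => some r | none => a) := by
  induction ys with
  | nil => intro a; simp [pvLastMatch]
  | cons e ys ih =>
    intro a
    simp only [pvLastMatch, List.foldl_cons] at *
    rw [ih, ih (if PySem.Dict.get? (PySem.Dict.mk e) "concept:name" = some activity then some e else none)]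
    split_ifs <;> cases ys.foldl _ none <;> simp

theorem pvLastMatch_append (activity : String) (xs ys : List (List (String × String))) :
    pvLastMatch activity (xs ++ ys) =
      (match pvLastMatch activity ys with | some r => some r | none => pvLastMatch activity xs) := by
  simp only [pvLastMatch, List.foldl_append]
  exact pvLastMatch_init activity ys _

-- A's countdown over indices < n is the last match of the first n events
theorem goA_eq_lastMatch (trace : List (List (String × String))) (activity : String) :
    ∀ n, n ≤ trace.length →
      extract_event_from_trace_goA trace activity n = pvLastMatch activity (trace.take n) := by
  intro n
  induction n with
  | zero => intro _; simp [extract_event_from_trace_goA, pvLastMatch]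
  | succ i ih =>
    intro h
    have hi : i < trace.length := Nat.lt_of_succ_le h
    obtain ⟨e, he⟩ : ∃ e, getElem? trace i = some e := ⟨_, List.getElem?_eq_getElem hi⟩
    rw [List.take_add_one, extract_event_from_trace_goA, he]
    simp only [Option.toList_some]
    rw [pvLastMatch_append, ih (Nat.le_of_lt hi)]
    simp only [pvLastMatch, List.foldl_cons, List.foldl_nil]
    split_ifs <;> rfl

-- B's divide and conquer on [lo, hi) is the last match of that slice
theorem goB_eq_lastMatch (trace : List (List (String × String))) (activity : String) :
    ∀ n lo hi, hi - lo = n →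
      extract_event_from_trace_goB trace activity lo hi =
        pvLastMatch activity ((trace.drop lo).take n) := by
  intro n
  induction n using Nat.strong_induction_on with
  | _ n ih =>
    intro lo hi hn
    unfold extract_event_from_trace_goB
    split_ifs with h0 h1
    · simp [← hn, h0, pvLastMatch]
    · subst hn
      rw [h1]
      have htake : (trace.drop lo).take 1 = (getElem? trace lo).toList := by
        rw [List.take_one, List.head?_drop]
      rcases hcase : getElem? trace lo with _ | e <;>
        rw [hcase] at htake <;> rw [htake] <;> simp [pvLastMatch]
    · -- hi - lo ≥ 2: split the slice at mid = (lo + hi) / 2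
      have hmid1 : lo < (lo + hi) / 2 := by omega
      have hmid2 : (lo + hi) / 2 < hi := by omega
      rw [ih (hi - (lo + hi) / 2) (by omega) ((lo + hi) / 2) hi rfl,
          ih ((lo + hi) / 2 - lo) (by omega) lo ((lo + hi) / 2) rfl]
      have hsplit : (trace.drop lo).take n =
          (trace.drop lo).take ((lo + hi) / 2 - lo) ++ (trace.drop ((lo + hi) / 2)).take (hi - (lo + hi) / 2) := by
        have hn2 : n = ((lo + hi) / 2 - lo) + (hi - (lo + hi) / 2) := by omega
        rw [hn2, List.take_add, List.drop_drop]
        have harg : lo + ((lo + hi) / 2 - lo) = (lo + hi) / 2 := by omega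
        rw [harg]
      rw [hsplit, pvLastMatch_append]

-- ===== VERDICT (by name: the statement is the Claim_ definition above) =====
theorem extract_event_from_trace_spec : Claim_equal_extract_event_from_trace := by
  intro trace activity _ _
  unfold Spec_extract_event_from_trace extract_event_from_trace extract_event_from_trace_alt
  rw [goA_eq_lastMatch trace activity trace.length le_rfl,
      goB_eq_lastMatch trace activity trace.length 0 trace.length (by omega)]
  simp
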